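-- pv_equiv track=rewrite | github.com/cedced19/tp-mp | TP4/TP4.py | bell
-- ===== SOURCE A (Python) =====
-- def binom2(n,p):
--     if (p==0):
--         return 1
--     if (p==1):
--         return n
--     return ((n)*(binom2(n-1,p-1)))//p
--
-- def bell (n):
--     a = [1,1]
--     for i in range(2,n+1):
--         S = 0
--         for k in range(i):
--             S+=binom2(i-1,k)*a[k]
--         a.append(S)
--     return a
-- ===== SOURCE B (Python) =====
-- def bell(n):
--     a = [1, 1]
--     row = [1, 1]  # Pascal's row: binomials C(i-1, k) for the upcoming iteration i
--     for _ in range(2, n + 1):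
--         a.append(sum(c * x for c, x in zip(row, a)))
--         row = [1] + [x + y for x, y in zip(row, row[1:])] + [1]
--     return a
-- ===== Notes on version B (the rewrite author's own statement) =====
-- stated objective: faster
-- what changed: Instead of recomputing every binomial C(i-1,k) by the recursive multiplicative/exact-division formula binom2, B maintains Pascal's row incrementally and computes each Bell number as a dot product of that row with the list so far.
import Mathlib
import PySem

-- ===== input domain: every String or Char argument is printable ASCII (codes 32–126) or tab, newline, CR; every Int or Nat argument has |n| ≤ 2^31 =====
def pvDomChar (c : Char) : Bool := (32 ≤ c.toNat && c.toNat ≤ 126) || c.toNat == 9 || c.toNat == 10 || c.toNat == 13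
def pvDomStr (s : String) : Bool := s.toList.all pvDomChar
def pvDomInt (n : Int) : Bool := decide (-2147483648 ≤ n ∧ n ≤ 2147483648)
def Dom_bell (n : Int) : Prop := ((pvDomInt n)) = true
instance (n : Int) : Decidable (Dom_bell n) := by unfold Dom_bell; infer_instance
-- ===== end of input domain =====

-- B replaces the per-term recursive binomial binom2 with an incrementally maintained
-- Pascal row and a dot product per iteration (objective: faster, O(n^2) vs O(n^3) arithmetic ops).


-- ===== PORT A =====
def binom2 (n p : Int) : Int :=
  if p = 0 then 1
  else if p = 1 then n
  else if p < 0 then 0  -- totality guard: Python recurses forever for p < 0; bell never calls binom2 with p < 0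
  else PySem.Int.floordiv (n * binom2 (n - 1) (p - 1)) p
termination_by p.toNat
decreasing_by omega

def bell (n : Int) : List Int :=
  (PySem.List.pyRange 2 (n + 1) 1).foldl
    (fun a i =>
      a ++ [(PySem.List.pyRange 0 i 1).foldl
        -- a[k]: k is always in range here (k < i = len a), so pyGetD's default is never used
        (fun S k => S + binom2 (i - 1) k * PySem.List.pyGetD a k 0) 0])
    [1, 1]

-- ===== PORT B =====
def bell_alt (n : Int) : List Int :=
  ((PySem.List.pyRange 2 (n + 1) 1).foldl
    (fun (st : List Int × List Int) _i =>
      (st.1 ++ [((st.2.zip st.1).map (fun p => p.1 * p.2)).sum],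
       1 :: ((st.2.zip (PySem.List.slice st.2 (some 1) none)).map (fun p => p.1 + p.2)) ++ [1]))
    ([1, 1], [1, 1])).1

-- ===== PRECONDITION & SPEC =====
def Spec_bell (n : Int) (out : List Int) : Prop := out = bell_alt n
instance (n : Int) (out : List Int) : Decidable (Spec_bell n out) := by unfold Spec_bell; infer_instance

-- ===== CLAIM (what is proved, stated in full; the proofs are below) =====
def Claim_equal_bell : Prop := ∀ (n : Int), Dom_bell n → Spec_bell n (bell n)

-- ===== LEMMAS AND PROOFS =====

-- Pascal's row m as a list: [C(m,0), …, C(m,m)]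
def crow (m : Nat) : List Int := (List.range (m + 1)).map (fun k => ((m.choose k : Nat) : Int))

-- A's recursive binom2 computes the binomial coefficient
lemma binom2_eq_choose : ∀ (k m : Nat), k ≤ m → binom2 (m : Int) (k : Int) = ((m.choose k : Nat) : Int) := by
  intro k
  induction k with
  | zero => intro m _; simp [binom2]
  | succ k ih =>
    intro m hkm
    rw [binom2]
    rcases Nat.eq_zero_or_pos k with hk | hk
    · subst hk; simp [Nat.choose_one_right]
    · have hm1 : 1 ≤ m := by omega
      have hcast : (m : Int) - 1 = ((m - 1 : Nat) : Int) := by omega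
      have hcast2 : (((k + 1 : Nat)) : Int) - 1 = (k : Int) := by push_cast; ring
      rw [if_neg (by push_cast; omega), if_neg (by push_cast; omega), if_neg (by push_cast; omega),
          hcast, hcast2, ih (m - 1) (by omega)]
      have hm : m - 1 + 1 = m := by omega
      have key : m * (m - 1).choose k = m.choose (k + 1) * (k + 1) := by
        have h := Nat.add_one_mul_choose_eq (m - 1) k
        rw [hm] at h
        exact h
      have key' : (m : Int) * (((m - 1).choose k : Nat) : Int)
          = ((m.choose (k + 1) : Nat) : Int) * (((k + 1 : Nat)) : Int) := by
        exact_mod_cast key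
      rw [key', PySem.Int.floordiv_eq_ediv_of_pos (by positivity),
          Int.mul_ediv_cancel _ (by positivity)]

-- zipping a range-mapped list with its own tail pairs consecutive values
lemma zip_range_tail {α : Type} : ∀ (n : Nat) (f : Nat → α),
    ((List.range (n + 1)).map f).zip (((List.range (n + 1)).map f).tail)
      = (List.range n).map (fun j => (f j, f (j + 1))) := by
  intro n
  induction n with
  | zero => intro f; simp
  | succ n ih =>
    intro f
    have h0 := ih (fun j => f (j + 1))
    simp only [List.range_succ_eq_map, List.map_cons, List.map_map, List.tail_cons,
      List.zip_cons_cons, Function.comp_def, Nat.succ_eq_add_one] at h0 ⊢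
    rw [h0]

-- B's row update is Pascal's rule
lemma crow_succ (m : Nat) :
    1 :: (((crow m).zip (PySem.List.slice (crow m) (some 1) none)).map (fun p => p.1 + p.2)) ++ [1]
      = crow (m + 1) := by
  rw [PySem.List.slice_from_one]
  unfold crow
  rw [zip_range_tail m (fun k => ((m.choose k : Nat) : Int))]
  rw [List.map_map]
  rw [List.range_succ (n := m + 1), List.range_succ_eq_map (n := m)]
  simp only [List.map_append, List.map_cons, List.map_map, Function.comp_def]
  simp only [List.cons_append, List.map_nil, Nat.choose_zero_right, Nat.choose_self,
    Nat.cast_one]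
  congr 1

-- an index-wise sum over range equals the dot product over the zip
lemma sum_range_mul : ∀ (t : Nat) (c a : List Int), c.length = t → a.length = t →
    ((List.range t).map (fun k => c.getD k 0 * a.getD k 0)).sum
      = ((c.zip a).map (fun p => p.1 * p.2)).sum := by
  intro t
  induction t with
  | zero =>
    intro c a hc ha
    rw [List.length_eq_zero_iff] at hc
    subst hc
    simp
  | succ t ih =>
    intro c a hc ha
    cases c with
    | nil => simp at hc
    | cons c0 cs =>
      cases a with
      | nil => simp at ha
      | cons a0 as =>
        rw [List.range_succ_eq_map (n := t)]
        simp only [List.map_cons, List.map_map, List.getD_cons_zero, List.zip_cons_cons,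
          List.sum_cons, Function.comp_def, Nat.succ_eq_add_one, List.getD_cons_succ]
        rw [ih cs as (by simpa using hc) (by simpa using ha)]

-- A's inner binomial-weighted sum equals B's dot product with Pascal's row
lemma innerA_eq_dot (i : Int) (a : List Int) (h2 : 2 ≤ i) (hlen : a.length = i.toNat) :
    (PySem.List.pyRange 0 i 1).foldl
        (fun S k => S + binom2 (i - 1) k * PySem.List.pyGetD a k 0) 0
      = (((crow (i.toNat - 1)).zip a).map (fun p => p.1 * p.2)).sum := by
  have hi : i = ((i.toNat : Nat) : Int) := by omega
  rw [PySem.List.foldl_add, zero_add]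
  conv_lhs => rw [hi, PySem.List.pyRange_zero_natCast, List.map_map]
  rw [← sum_range_mul i.toNat (crow (i.toNat - 1)) a (by simp [crow]; omega) hlen]
  apply congrArg
  apply List.map_congr_left
  intro k hk
  rw [List.mem_range] at hk
  simp only [Function.comp_def]
  rw [show ((i.toNat : Nat) : Int) - 1 = ((i.toNat - 1 : Nat) : Int) from by omega]
  rw [binom2_eq_choose k (i.toNat - 1) (by omega), PySem.List.pyGetD_natCast]
  unfold crow
  rw [PySem.List.getD_map_range _ _ _ _ (by omega)]

-- the loop invariant: B's second component is Pascal's row, the first tracks A's list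
lemma main_loop (m : Nat) : ∀ (i b : Int) (a : List Int), 2 ≤ i → (b - i).toNat = m →
    a.length = i.toNat →
    (PySem.List.pyRange i b 1).foldl
      (fun a i =>
        a ++ [(PySem.List.pyRange 0 i 1).foldl
          (fun S k => S + binom2 (i - 1) k * PySem.List.pyGetD a k 0) 0]) a
    = ((PySem.List.pyRange i b 1).foldl
        (fun (st : List Int × List Int) _i =>
          (st.1 ++ [((st.2.zip st.1).map (fun p => p.1 * p.2)).sum],
           1 :: ((st.2.zip (PySem.List.slice st.2 (some 1) none)).map (fun p => p.1 + p.2)) ++ [1]))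
        (a, crow (i.toNat - 1))).1 := by
  induction m with
  | zero =>
    intro i b a h2 hm hlen
    rw [PySem.List.pyRange_one_eq_nil (by omega)]
    rfl
  | succ m ih =>
    intro i b a h2 hm hlen
    rw [PySem.List.pyRange_one_cons (by omega)]
    simp only [List.foldl_cons]
    rw [innerA_eq_dot i a h2 hlen]
    have hrow : 1 :: (((crow (i.toNat - 1)).zip
          (PySem.List.slice (crow (i.toNat - 1)) (some 1) none)).map (fun p => p.1 + p.2)) ++ [1]
        = crow ((i + 1).toNat - 1) := by
      rw [crow_succ (i.toNat - 1), show i.toNat - 1 + 1 = (i + 1).toNat - 1 from by omega]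
    rw [hrow]
    exact ih (i + 1) b (a ++ [(((crow (i.toNat - 1)).zip a).map (fun p => p.1 * p.2)).sum])
      (by omega) (by omega) (by simp [hlen]; omega)

-- ===== VERDICT (by name: the statement is the Claim_ definition above) =====
theorem bell_spec : Claim_equal_bell := by
  intro n _
  unfold Spec_bell bell bell_alt
  have h := main_loop (n + 1 - 2).toNat 2 (n + 1) [1, 1] (by omega) rfl (by decide)
  simpa [crow] using h
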